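-- pv_equiv track=rewrite | github.com/zrygan/nlp | nlp_tool/naturalsyon.py | apply_reduplication
-- ===== SOURCE A (Python) =====
-- def apply_reduplication(word: str, pattern: str = 'full', prefix: str = '') -> str:
--     """
--     Apply Filipino reduplication patterns (Section 2.3.5)
--
--     For recent completion (ka-): reduplicate first syllable of ROOT, not prefix
--     Example: ka-gising -> ka-gi-gising (not ka-ka-gising)
--     """
--     if pattern == 'full':
--         return f'{word}-{word}'
--
--     elif pattern == 'partial':
--         # Reduplicate first CV (consonant-vowel)
--         vowels = 'aeiou'
--
--         # Skip prefix if provided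
--         root = word
--         if prefix and word.startswith(prefix):
--             root = word[len(prefix):]
--
--         # Find first CV pattern in root
--         for i in range(len(root) - 1):
--             if root[i] not in vowels and root[i+1] in vowels:
--                 reduplication = root[:i+1]
--                 if prefix:
--                     return f'{prefix}{reduplication}-{root}'
--                 else:
--                     return f'{reduplication}-{root}'
--
--         # Fallback
--         return f'{word[:2]}-{word}'
--
--     elif pattern == 'recent':
--         # ka- + CV-reduplication (Section 2.3.5)
--         # kagigising = ka-gi-gising (reduplicate first syllable of "gising")
--         vowels = 'aeiou'
--
--         for i in range(len(word) - 1):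
--             if word[i] not in vowels and word[i+1] in vowels:
--                 first_syllable = word[:i+2]  # Get CV
--                 return f'ka{first_syllable}-{word}'
--
--         return f'ka{word[:2]}-{word}'
--
--     return word
-- ===== SOURCE B (Python) =====
-- def _cv_index(s):
--     """Index of the first consonant-vowel pair in s, -1 if none: classify each
--     char as C/V, then substring-search the mask for 'CV'."""
--     vowels = 'aeiou'
--     mask = ''.join('V' if c in vowels else 'C' for c in s)
--     return mask.find('CV')
--
--
-- def apply_reduplication(word: str, pattern: str = 'full', prefix: str = '') -> str:
--     if pattern == 'full':
--         return f'{word}-{word}'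
--     if pattern == 'partial':
--         root = word[len(prefix):] if prefix and word.startswith(prefix) else word
--         i = _cv_index(root)
--         if i >= 0:
--             return f'{prefix}{root[:i+1]}-{root}'
--         return f'{word[:2]}-{word}'
--     if pattern == 'recent':
--         i = _cv_index(word)
--         if i >= 0:
--             return f'ka{word[:i+2]}-{word}'
--         return f'ka{word[:2]}-{word}'
--     return word
-- ===== Notes on version B (the rewrite author's own statement) =====
-- stated objective: idiomatic
-- what changed: The explicit index loop over adjacent characters is replaced by classifying every character into a C/V mask string once and locating the first consonant-vowel boundary with a single substring search mask.find('CV'), shared by the 'partial' and 'recent' branches through one helper.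
import Mathlib
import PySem

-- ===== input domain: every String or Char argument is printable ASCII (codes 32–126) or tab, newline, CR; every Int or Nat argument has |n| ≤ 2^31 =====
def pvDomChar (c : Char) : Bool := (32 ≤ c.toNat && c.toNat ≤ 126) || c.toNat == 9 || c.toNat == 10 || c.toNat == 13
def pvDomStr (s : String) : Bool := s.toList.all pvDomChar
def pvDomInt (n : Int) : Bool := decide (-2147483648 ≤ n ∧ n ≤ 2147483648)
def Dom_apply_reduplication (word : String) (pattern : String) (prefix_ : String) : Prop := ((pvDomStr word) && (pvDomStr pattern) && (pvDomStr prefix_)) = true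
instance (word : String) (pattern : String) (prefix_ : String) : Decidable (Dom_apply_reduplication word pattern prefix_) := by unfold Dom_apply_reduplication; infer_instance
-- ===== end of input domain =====

-- B replaces A's adjacent-index scan by building a C/V classification mask and
-- substring-searching it for "CV" (one helper shared by both branches); same cost, more idiomatic.


-- ===== PORT A =====
-- `c in 'aeiou'` on a single character (Python substring membership of a 1-char string)
def pvInVowels (c : Char) : Bool := PySem.Chars.isIn [c] ("aeiou".toList)

-- the `for i in range(len(root)-1)` loop of the 'partial' branch, early return as Option
def pvALoopPartial (root : List Char) (pfx : List Char) : List Int → Option (List Char)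
  | [] => none
  | i :: rest =>
    match PySem.List.pyGet? root i, PySem.List.pyGet? root (i+1) with
    | some c1, some c2 =>
      if !pvInVowels c1 && pvInVowels c2 then
        let redup := PySem.List.slice root none (some (i+1))   -- root[:i+1]
        some (if pfx ≠ [] then pfx ++ redup ++ '-' :: root     -- f'{prefix}{reduplication}-{root}'
              else redup ++ '-' :: root)                       -- f'{reduplication}-{root}'
      else pvALoopPartial root pfx rest
    | _, _ => pvALoopPartial root pfx rest   -- unreachable: i and i+1 are always in range

-- the `for i in range(len(word)-1)` loop of the 'recent' branch
def pvALoopRecent (w : List Char) : List Int → Option (List Char)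
  | [] => none
  | i :: rest =>
    match PySem.List.pyGet? w i, PySem.List.pyGet? w (i+1) with
    | some c1, some c2 =>
      if !pvInVowels c1 && pvInVowels c2 then
        let fs := PySem.List.slice w none (some (i+2))   -- word[:i+2]
        some ('k' :: 'a' :: fs ++ '-' :: w)              -- f'ka{first_syllable}-{word}'
      else pvALoopRecent w rest
    | _, _ => pvALoopRecent w rest

def apply_reduplication (word : String) (pattern : String) (prefix_ : String) : String :=
  if pattern = "full" then String.ofList (word.toList ++ '-' :: word.toList)
  else if pattern = "partial" then
    let root := if prefix_.toList ≠ [] ∧ PySem.Str.startswith word prefix_ = true then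
        PySem.List.slice word.toList (some (prefix_.toList.length : Int)) none   -- word[len(prefix):]
      else word.toList
    match pvALoopPartial root prefix_.toList (PySem.List.pyRange 0 ((root.length : Int) - 1) 1) with
    | some s => String.ofList s
    | none => String.ofList (PySem.List.slice word.toList none (some 2) ++ '-' :: word.toList)
  else if pattern = "recent" then
    match pvALoopRecent word.toList (PySem.List.pyRange 0 ((word.toList.length : Int) - 1) 1) with
    | some s => String.ofList s
    | none => String.ofList ('k' :: 'a' :: PySem.List.slice word.toList none (some 2) ++ '-' :: word.toList)
  else word

-- ===== PORT B =====
-- mask = ''.join('V' if c in vowels else 'C' for c in s)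
def pvMask (cs : List Char) : List Char := cs.map (fun c => if pvInVowels c then 'V' else 'C')

-- def _cv_index(s): return mask.find('CV')
def pvCvIndex (cs : List Char) : Int := PySem.Chars.find (pvMask cs) ['C', 'V']

def apply_reduplication_alt (word : String) (pattern : String) (prefix_ : String) : String :=
  if pattern = "full" then String.ofList (word.toList ++ '-' :: word.toList)
  else if pattern = "partial" then
    let root := if prefix_.toList ≠ [] ∧ PySem.Str.startswith word prefix_ = true then
        PySem.List.slice word.toList (some (prefix_.toList.length : Int)) none
      else word.toList
    let i := pvCvIndex root
    if i ≥ 0 then String.ofList (prefix_.toList ++ PySem.List.slice root none (some (i+1)) ++ '-' :: root)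
    else String.ofList (PySem.List.slice word.toList none (some 2) ++ '-' :: word.toList)
  else if pattern = "recent" then
    let i := pvCvIndex word.toList
    if i ≥ 0 then String.ofList ('k' :: 'a' :: PySem.List.slice word.toList none (some (i+2)) ++ '-' :: word.toList)
    else String.ofList ('k' :: 'a' :: PySem.List.slice word.toList none (some 2) ++ '-' :: word.toList)
  else word

-- ===== PRECONDITION & SPEC =====
def Spec_apply_reduplication (word : String) (pattern : String) (prefix_ : String) (out : String) : Prop := out = apply_reduplication_alt word pattern prefix_
instance (word : String) (pattern : String) (prefix_ : String) (out : String) : Decidable (Spec_apply_reduplication word pattern prefix_ out) := by unfold Spec_apply_reduplication; infer_instance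

-- ===== CLAIM (what is proved, stated in full; the proofs are below) =====
def Claim_equal_apply_reduplication : Prop := ∀ (word : String) (pattern : String) (prefix_ : String), Dom_apply_reduplication word pattern prefix_ → Spec_apply_reduplication word pattern prefix_ (apply_reduplication word pattern prefix_)

-- ===== LEMMAS AND PROOFS =====

-- "there is a consonant-vowel pair at index j of cs"
def pvCvAt (cs : List Char) (j : Nat) : Prop :=
  ∃ c1 c2, cs[j]? = some c1 ∧ cs[j+1]? = some c2 ∧ pvInVowels c1 = false ∧ pvInVowels c2 = true

theorem pvPairPrefix (a b : Char) (t : List Char) : ([a,b] <+: t) ↔ t[0]? = some a ∧ t[1]? = some b := by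
  cases t with
  | nil => simp
  | cons x t' => cases t' <;> simp [List.cons_prefix_cons, eq_comm]

theorem pvCvAt_iff_prefix (cs : List Char) (j : Nat) :
    (['C','V'] <+: (pvMask cs).drop j) ↔ pvCvAt cs j := by
  rw [pvPairPrefix]
  simp only [List.getElem?_drop, pvMask, List.getElem?_map, pvCvAt]
  constructor
  · rintro ⟨h1, h2⟩
    rw [Option.map_eq_some_iff] at h1 h2
    obtain ⟨c1, hc1, e1⟩ := h1
    obtain ⟨c2, hc2, e2⟩ := h2
    refine ⟨c1, c2, by simpa using hc1, by simpa [Nat.add_comm] using hc2, ?_, ?_⟩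
    · cases hv : pvInVowels c1 with
      | true => simp [hv] at e1
      | false => rfl
    · cases hv : pvInVowels c2 with
      | true => rfl
      | false => simp [hv] at e2
  · rintro ⟨c1, c2, h1, h2, v1, v2⟩
    constructor
    · simp [h1, v1]
    · rw [show j + 1 + 0 = j + 1 by omega, h2]
      simp [v2]

theorem pvCvAt_bound (cs : List Char) (j : Nat) (h : pvCvAt cs j) : j + 1 < cs.length := by
  obtain ⟨c1, c2, _, h2, _, _⟩ := h
  exact (List.getElem?_eq_some_iff.mp h2).1

theorem pvCvAt_cond (cs : List Char) (k : Nat) (hk : k + 1 < cs.length) (h : ¬ pvCvAt cs k) :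
    (!pvInVowels (cs[k]'(by omega)) && pvInVowels (cs[k+1]'hk)) = false := by
  cases hv1 : pvInVowels (cs[k]'(by omega)) with
  | true => simp
  | false =>
    cases hv2 : pvInVowels (cs[k+1]'hk) with
    | true =>
      exact absurd ⟨cs[k]'(by omega), cs[k+1]'hk,
        List.getElem?_eq_getElem (by omega), List.getElem?_eq_getElem hk, hv1, hv2⟩ h
    | false => simp

-- unfold one step of A's loop at an in-range index k
theorem pvGet_pair (cs : List Char) (k : Nat) (hk : k + 1 < cs.length) :
    PySem.List.pyGet? cs (k : Int) = some (cs[k]'(by omega)) ∧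
    PySem.List.pyGet? cs ((k : Int) + 1) = some (cs[k+1]'hk) := by
  constructor
  · rw [PySem.List.pyGet?_natCast, List.getElem?_eq_getElem (by omega)]
  · rw [show ((k : Int) + 1) = ((k+1 : Nat) : Int) by push_cast; ring,
        PySem.List.pyGet?_natCast, List.getElem?_eq_getElem hk]

theorem pvLoopPartial_none (cs pfx : List Char) (h : ∀ j, ¬ pvCvAt cs j) :
    ∀ n k, cs.length - 1 - k ≤ n →
      pvALoopPartial cs pfx (PySem.List.pyRange (k : Int) ((cs.length : Int) - 1) 1) = none := by
  intro n
  induction n with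
  | zero =>
    intro k hk
    rw [PySem.List.pyRange_one_eq_nil (by omega)]
    rfl
  | succ n ih =>
    intro k hk
    by_cases hlt : (k : Int) < (cs.length : Int) - 1
    · have hk1 : k + 1 < cs.length := by push_cast at hlt; omega
      rw [PySem.List.pyRange_one_cons hlt]
      obtain ⟨g1, g2⟩ := pvGet_pair cs k hk1
      simp only [pvALoopPartial, g1, g2, pvCvAt_cond cs k hk1 (h k), Bool.false_eq_true, if_false]
      have := ih (k+1) (by omega)
      push_cast at this ⊢
      exact this
    · rw [PySem.List.pyRange_one_eq_nil (by omega)]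
      rfl

theorem pvLoopPartial_found (cs pfx : List Char) (j : Nat) (hj : pvCvAt cs j) :
    pvALoopPartial cs pfx (PySem.List.pyRange (j : Int) ((cs.length : Int) - 1) 1)
      = some (pfx ++ PySem.List.slice cs none (some ((j : Int) + 1)) ++ '-' :: cs) := by
  have hb := pvCvAt_bound cs j hj
  have hlt : (j : Int) < (cs.length : Int) - 1 := by omega
  rw [PySem.List.pyRange_one_cons hlt]
  obtain ⟨g1, g2⟩ := pvGet_pair cs j hb
  obtain ⟨c1, c2, h1, h2, v1, v2⟩ := hj
  have e1 : cs[j]'(by omega) = c1 := by rw [List.getElem?_eq_getElem (by omega)] at h1; injection h1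
  have e2 : cs[j+1]'hb = c2 := by rw [List.getElem?_eq_getElem hb] at h2; injection h2
  simp only [pvALoopPartial, g1, g2, e1, e2, v1, v2, Bool.not_false, Bool.true_and, if_true]
  by_cases hp : pfx = []
  · simp [hp]
  · simp [hp]

theorem pvLoopPartial_some (cs pfx : List Char) (j : Nat) (hj : pvCvAt cs j)
    (hmin : ∀ i, i < j → ¬ pvCvAt cs i) :
    ∀ n k, k ≤ j → j - k ≤ n →
      pvALoopPartial cs pfx (PySem.List.pyRange (k : Int) ((cs.length : Int) - 1) 1)
        = some (pfx ++ PySem.List.slice cs none (some ((j : Int) + 1)) ++ '-' :: cs) := by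
  intro n
  induction n with
  | zero =>
    intro k hk hn
    have : k = j := by omega
    subst this
    exact pvLoopPartial_found cs pfx k hj
  | succ n ih =>
    intro k hk hn
    by_cases hkj : k = j
    · subst hkj
      exact pvLoopPartial_found cs pfx k hj
    · have hkj' : k < j := by omega
      have hk1 : k + 1 < cs.length := by have := pvCvAt_bound cs j hj; omega
      have hlt : (k : Int) < (cs.length : Int) - 1 := by omega
      rw [PySem.List.pyRange_one_cons hlt]
      obtain ⟨g1, g2⟩ := pvGet_pair cs k hk1
      simp only [pvALoopPartial, g1, g2, pvCvAt_cond cs k hk1 (hmin k hkj'), Bool.false_eq_true, if_false]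
      have := ih (k+1) (by omega) (by omega)
      push_cast at this ⊢
      exact this

theorem pvLoopRecent_none (cs : List Char) (h : ∀ j, ¬ pvCvAt cs j) :
    ∀ n k, cs.length - 1 - k ≤ n →
      pvALoopRecent cs (PySem.List.pyRange (k : Int) ((cs.length : Int) - 1) 1) = none := by
  intro n
  induction n with
  | zero =>
    intro k hk
    rw [PySem.List.pyRange_one_eq_nil (by omega)]
    rfl
  | succ n ih =>
    intro k hk
    by_cases hlt : (k : Int) < (cs.length : Int) - 1
    · have hk1 : k + 1 < cs.length := by push_cast at hlt; omega
      rw [PySem.List.pyRange_one_cons hlt]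
      obtain ⟨g1, g2⟩ := pvGet_pair cs k hk1
      simp only [pvALoopRecent, g1, g2, pvCvAt_cond cs k hk1 (h k), Bool.false_eq_true, if_false]
      have := ih (k+1) (by omega)
      push_cast at this ⊢
      exact this
    · rw [PySem.List.pyRange_one_eq_nil (by omega)]
      rfl

theorem pvLoopRecent_found (cs : List Char) (j : Nat) (hj : pvCvAt cs j) :
    pvALoopRecent cs (PySem.List.pyRange (j : Int) ((cs.length : Int) - 1) 1)
      = some ('k' :: 'a' :: PySem.List.slice cs none (some ((j : Int) + 2)) ++ '-' :: cs) := by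
  have hb := pvCvAt_bound cs j hj
  have hlt : (j : Int) < (cs.length : Int) - 1 := by omega
  rw [PySem.List.pyRange_one_cons hlt]
  obtain ⟨g1, g2⟩ := pvGet_pair cs j hb
  obtain ⟨c1, c2, h1, h2, v1, v2⟩ := hj
  have e1 : cs[j]'(by omega) = c1 := by rw [List.getElem?_eq_getElem (by omega)] at h1; injection h1
  have e2 : cs[j+1]'hb = c2 := by rw [List.getElem?_eq_getElem hb] at h2; injection h2
  simp only [pvALoopRecent, g1, g2, e1, e2, v1, v2, Bool.not_false, Bool.true_and, if_true]

theorem pvLoopRecent_some (cs : List Char) (j : Nat) (hj : pvCvAt cs j)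
    (hmin : ∀ i, i < j → ¬ pvCvAt cs i) :
    ∀ n k, k ≤ j → j - k ≤ n →
      pvALoopRecent cs (PySem.List.pyRange (k : Int) ((cs.length : Int) - 1) 1)
        = some ('k' :: 'a' :: PySem.List.slice cs none (some ((j : Int) + 2)) ++ '-' :: cs) := by
  intro n
  induction n with
  | zero =>
    intro k hk hn
    have : k = j := by omega
    subst this
    exact pvLoopRecent_found cs k hj
  | succ n ih =>
    intro k hk hn
    by_cases hkj : k = j
    · subst hkj
      exact pvLoopRecent_found cs k hj
    · have hkj' : k < j := by omega
      have hk1 : k + 1 < cs.length := by have := pvCvAt_bound cs j hj; omega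
      have hlt : (k : Int) < (cs.length : Int) - 1 := by omega
      rw [PySem.List.pyRange_one_cons hlt]
      obtain ⟨g1, g2⟩ := pvGet_pair cs k hk1
      simp only [pvALoopRecent, g1, g2, pvCvAt_cond cs k hk1 (hmin k hkj'), Bool.false_eq_true, if_false]
      have := ih (k+1) (by omega) (by omega)
      push_cast at this ⊢
      exact this

-- B's mask search characterises A's scan
theorem pvFind_pos (cs : List Char) (h : pvCvIndex cs ≥ 0) :
    pvCvAt cs (pvCvIndex cs).toNat ∧ ∀ i, i < (pvCvIndex cs).toNat → ¬ pvCvAt cs i := by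
  obtain ⟨hpre, hmin⟩ := PySem.Chars.find_spec (s := pvMask cs) (sub := ['C','V']) h
  exact ⟨(pvCvAt_iff_prefix cs _).mp hpre,
    fun i hi hc => hmin i hi ((pvCvAt_iff_prefix cs i).mpr hc)⟩

theorem pvFind_neg (cs : List Char) (h : ¬ pvCvIndex cs ≥ 0) : ∀ j, ¬ pvCvAt cs j := by
  intro j hj
  have hm1 : pvCvIndex cs = -1 := by
    have := PySem.Chars.neg_one_le_find (pvMask cs) ['C','V']
    unfold pvCvIndex at h ⊢
    omega
  have hinf : ['C','V'] <:+: pvMask cs :=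
    ((pvCvAt_iff_prefix cs j).mpr hj).isInfix.trans (List.drop_suffix j (pvMask cs)).isInfix
  exact (PySem.Chars.find_eq_neg_one_iff _ _).mp hm1 hinf

theorem pvPartialBranch (w pfx root : List Char) :
    (match pvALoopPartial root pfx (PySem.List.pyRange 0 ((root.length : Int) - 1) 1) with
      | some s => String.ofList s
      | none => String.ofList (PySem.List.slice w none (some 2) ++ '-' :: w))
    = (if pvCvIndex root ≥ 0 then
         String.ofList (pfx ++ PySem.List.slice root none (some (pvCvIndex root + 1)) ++ '-' :: root)
       else String.ofList (PySem.List.slice w none (some 2) ++ '-' :: w)) := by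
  by_cases h : pvCvIndex root ≥ 0
  · obtain ⟨hj, hmin⟩ := pvFind_pos root h
    have := pvLoopPartial_some root pfx (pvCvIndex root).toNat hj hmin (pvCvIndex root).toNat 0
      (by omega) (by omega)
    rw [Nat.cast_zero] at this
    rw [this, if_pos h, Int.toNat_of_nonneg h]
  · have := pvLoopPartial_none root pfx (pvFind_neg root h) (root.length) 0 (by omega)
    rw [Nat.cast_zero] at this
    rw [this, if_neg h]

theorem pvRecentBranch (w : List Char) :
    (match pvALoopRecent w (PySem.List.pyRange 0 ((w.length : Int) - 1) 1) with
      | some s => String.ofList s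
      | none => String.ofList ('k' :: 'a' :: PySem.List.slice w none (some 2) ++ '-' :: w))
    = (if pvCvIndex w ≥ 0 then
         String.ofList ('k' :: 'a' :: PySem.List.slice w none (some (pvCvIndex w + 2)) ++ '-' :: w)
       else String.ofList ('k' :: 'a' :: PySem.List.slice w none (some 2) ++ '-' :: w)) := by
  by_cases h : pvCvIndex w ≥ 0
  · obtain ⟨hj, hmin⟩ := pvFind_pos w h
    have := pvLoopRecent_some w (pvCvIndex w).toNat hj hmin (pvCvIndex w).toNat 0
      (by omega) (by omega)
    rw [Nat.cast_zero] at this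
    rw [this, if_pos h, Int.toNat_of_nonneg h]
  · have := pvLoopRecent_none w (pvFind_neg w h) (w.length) 0 (by omega)
    rw [Nat.cast_zero] at this
    rw [this, if_neg h]

-- ===== VERDICT (by name: the statement is the Claim_ definition above) =====
theorem apply_reduplication_spec : Claim_equal_apply_reduplication := by
  intro word pattern prefix_ _
  show apply_reduplication word pattern prefix_ = apply_reduplication_alt word pattern prefix_
  unfold apply_reduplication apply_reduplication_alt
  by_cases h1 : pattern = "full"
  · rw [if_pos h1, if_pos h1]
  rw [if_neg h1, if_neg h1]
  by_cases h2 : pattern = "partial"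
  · rw [if_pos h2, if_pos h2]
    exact pvPartialBranch word.toList prefix_.toList _
  rw [if_neg h2, if_neg h2]
  by_cases h3 : pattern = "recent"
  · rw [if_pos h3, if_pos h3]
    exact pvRecentBranch word.toList
  rw [if_neg h3, if_neg h3]
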